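-- pv_equiv track=rewrite | github.com/yingbo-ma/Project-Code | Regular-Workspace/NLP/ENGAGE/support_functions.py | feature_NU
-- ===== SOURCE A (Python) =====
-- def feature_NU(Speakers_Corpus): # we use the before how many sentence spoken to predict whether is going to have speaker switch in this sentence or not
--     NU_feature = []
--     corpus_size = len(Speakers_Corpus)
--     for speaker_index in range(corpus_size):
--         if speaker_index == 0:
--             NU_feature.append(1)
--         elif Speakers_Corpus[speaker_index] == Speakers_Corpus[speaker_index-1]: # the speaker in this sentence not changed
--             NU_feature.append(NU_feature[-1]+1)
--         else: # the speaker in this sentence changed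
--             NU_feature.append(1)
--     return NU_feature
-- ===== SOURCE B (Python) =====
-- def feature_NU(Speakers_Corpus):
--     NU_feature = []
--     i, n = 0, len(Speakers_Corpus)
--     while i < n:
--         j = i + 1
--         while j < n and Speakers_Corpus[j] == Speakers_Corpus[i]:
--             j += 1
--         NU_feature.extend(range(1, j - i + 1))
--         i = j
--     return NU_feature
-- ===== Notes on version B (the rewrite author's own statement) =====
-- stated objective: alternative
-- what changed: B first finds each maximal run of consecutive identical speakers (two-stage: locate run boundary, then extend with range(1, L+1)), instead of A's per-element comparison that reads the running count back out of its own output list.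
import Mathlib
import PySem

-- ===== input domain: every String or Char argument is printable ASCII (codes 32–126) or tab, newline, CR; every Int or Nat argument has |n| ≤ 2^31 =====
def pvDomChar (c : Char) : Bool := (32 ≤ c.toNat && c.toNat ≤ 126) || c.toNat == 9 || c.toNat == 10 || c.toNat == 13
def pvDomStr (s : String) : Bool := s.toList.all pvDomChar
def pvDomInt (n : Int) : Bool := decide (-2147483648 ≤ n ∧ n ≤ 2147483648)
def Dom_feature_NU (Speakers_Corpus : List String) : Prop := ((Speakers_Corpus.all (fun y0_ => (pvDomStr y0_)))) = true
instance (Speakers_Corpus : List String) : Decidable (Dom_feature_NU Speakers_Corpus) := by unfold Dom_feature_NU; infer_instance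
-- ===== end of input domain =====

-- B splits the corpus into maximal runs of equal consecutive speakers and expands each run
-- of length L into 1..L, instead of A's per-element comparison reading back its own output
-- list; objective: alternative decomposition, same O(n) cost.


-- ===== PORT A =====
-- Literal port of A: fold over range(len(xs)); list indexing xs[i], xs[i-1] is always in
-- range (0 ≤ i < len) so List.getD is exact; NU_feature[-1] is the last element of the
-- accumulator, which is nonempty at that branch, so getLast?.getD 0 is exact.
def feature_NU (Speakers_Corpus : List String) : List Int :=
  (List.range Speakers_Corpus.length).foldl (fun acc i =>
    if i = 0 then acc ++ [(1 : Int)]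
    else if Speakers_Corpus.getD i "" = Speakers_Corpus.getD (i - 1) "" then
      acc ++ [acc.getLast?.getD 0 + 1]
    else acc ++ [(1 : Int)]) []

-- ===== PORT B =====
-- Port of B: the inner while loop scans to the end of the current run (takeWhile/dropWhile
-- realise exactly that boundary scan); range(1, L+1) is (List.range L).map (·+1).
def runLengths (xs : List String) : List Nat :=
  match xs with
  | [] => []
  | x :: rest =>
    ((rest.takeWhile (· = x)).length + 1) :: runLengths (rest.dropWhile (· = x))
termination_by xs.length
decreasing_by
  simp only [List.length_cons]
  exact Nat.lt_succ_of_le (List.length_dropWhile_le _ _)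

def feature_NU_alt (Speakers_Corpus : List String) : List Int :=
  (runLengths Speakers_Corpus).flatMap (fun L => (List.range L).map (fun k : Nat => ((k : Int) + 1)))

-- ===== PRECONDITION & SPEC =====
def Spec_feature_NU (Speakers_Corpus : List String) (out : List Int) : Prop := out = feature_NU_alt Speakers_Corpus
instance (Speakers_Corpus : List String) (out : List Int) : Decidable (Spec_feature_NU Speakers_Corpus out) := by unfold Spec_feature_NU; infer_instance

-- ===== CLAIM (what is proved, stated in full; the proofs are below) =====
def Claim_equal_feature_NU : Prop := ∀ (Speakers_Corpus : List String), Dom_feature_NU Speakers_Corpus → Spec_feature_NU Speakers_Corpus (feature_NU Speakers_Corpus)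

-- ===== LEMMAS AND PROOFS =====

-- Reference recursion: the natural scalar-counter formulation both ports are shown equal to.
def specGo (prev : String) (c : Int) : List String → List Int
  | [] => []
  | y :: ys => if y = prev then (c + 1) :: specGo y (c + 1) ys else (1 : Int) :: specGo y 1 ys

def spec : List String → List Int
  | [] => []
  | x :: xs => (1 : Int) :: specGo x 1 xs

theorem getLast?_getD_irrel {α : Type} (a : α) (l : List α) (d e : α) :
    (a :: l).getLast?.getD d = (a :: l).getLast?.getD e := by
  cases h : (a :: l).getLast? with
  | none => simp [List.getLast?_eq_none_iff] at h
  | some v => simp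

theorem cons_getLast?_getD {α : Type} (a : α) (l : List α) (d : α) :
    (a :: l).getLast?.getD d = l.getLast?.getD a := by
  cases l with
  | nil => simp
  | cons b t =>
    rw [List.getLast?_cons_cons]
    exact getLast?_getD_irrel b t d a

-- ---- B = spec ----

theorem specGo_run (x : String) (r : List String) (l : List String) (c : Int)
    (h : ∀ y ∈ l, y = x) :
    specGo x c (l ++ r) =
      (List.range l.length).map (fun k : Nat => (c + k + 1 : Int)) ++ specGo x (c + l.length) r := by
  induction l generalizing c with
  | nil => simp
  | cons a l ih =>
    have ha : a = x := h a (by simp)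
    subst ha
    have e : specGo a c ((a :: l) ++ r) = (c + 1) :: specGo a (c + 1) (l ++ r) := by
      simp [specGo]
    rw [e, ih _ (fun y hy => h y (List.mem_cons_of_mem _ hy))]
    simp only [List.length_cons, List.range_succ_eq_map, List.map_cons, List.map_map,
      List.cons_append]
    congr 1
    · push_cast; ring
    congr 1
    · exact List.map_congr_left (fun k _ => by simp only [Function.comp_apply]; push_cast; ring)
    · congr 1
      push_cast
      ring

theorem specGo_dropWhile (x : String) (c : Int) (rest : List String) :
    specGo x c (rest.dropWhile (· = x)) = spec (rest.dropWhile (· = x)) := by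
  rcases hd : rest.dropWhile (· = x) with _ | ⟨h, t⟩
  · simp [specGo, spec]
  · have hne : ¬ (h = x) := by
      have := List.head_dropWhile_not (fun y => decide (y = x)) (l := rest)
      rw [hd] at this
      simpa using this (by simp)
    simp [specGo, spec, hne]

theorem alt_eq_spec (xs : List String) : feature_NU_alt xs = spec xs := by
  unfold feature_NU_alt
  induction xs using runLengths.induct with
  | case1 => simp [runLengths, spec]
  | case2 x rest ih =>
    rw [runLengths]
    simp only [List.flatMap_cons]
    rw [ih]
    have hx : spec (x :: rest) = (1 : Int) :: specGo x 1 rest := rfl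
    rw [hx]
    conv_rhs => rw [← List.takeWhile_append_dropWhile (p := fun y => decide (y = x)) (l := rest)]
    rw [specGo_run x _ _ 1 (fun y hy => by
      have := List.mem_takeWhile_imp (p := fun z => decide (z = x)) hy
      simpa using this)]
    rw [specGo_dropWhile]
    simp only [List.range_succ_eq_map, List.map_cons, List.map_map, List.cons_append]
    congr 1
    congr 1
    exact List.map_congr_left (fun k _ => by simp only [Function.comp_apply]; push_cast; ring)

-- ---- A = spec ----

theorem specGo_snoc (xs : List String) (p : String) (c : Int) (y : String) :
    specGo p c (xs ++ [y]) = specGo p c xs ++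
      [if y = xs.getLast?.getD p then (specGo p c xs).getLast?.getD c + 1 else 1] := by
  induction xs generalizing p c with
  | nil => by_cases h : y = p <;> simp [specGo, h]
  | cons a xs ih =>
    have e : specGo p c ((a :: xs) ++ [y]) =
        if a = p then (c + 1) :: specGo a (c + 1) (xs ++ [y])
        else (1 : Int) :: specGo a 1 (xs ++ [y]) := rfl
    have e2 : specGo p c (a :: xs) =
        if a = p then (c + 1) :: specGo a (c + 1) xs
        else (1 : Int) :: specGo a 1 xs := rfl
    rw [e, e2]
    by_cases h : a = p
    · rw [if_pos h, if_pos h, ih, cons_getLast?_getD a xs p, cons_getLast?_getD]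
      simp
    · rw [if_neg h, if_neg h, ih, cons_getLast?_getD a xs p, cons_getLast?_getD]
      simp

theorem spec_snoc (xs : List String) (y : String) (hxs : xs ≠ []) :
    spec (xs ++ [y]) = spec xs ++
      [if y = xs.getLast?.getD "" then (spec xs).getLast?.getD 0 + 1 else 1] := by
  rcases xs with _ | ⟨x, t⟩
  · exact absurd rfl hxs
  · have e : spec ((x :: t) ++ [y]) = (1 : Int) :: specGo x 1 (t ++ [y]) := rfl
    have e2 : spec (x :: t) = (1 : Int) :: specGo x 1 t := rfl
    rw [e, e2, specGo_snoc, cons_getLast?_getD x t "", cons_getLast?_getD]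
    simp

theorem getLast?_getD_of_ne_nil {α : Type} (l : List α) (d : α) :
    l.getLast?.getD d = l.getD (l.length - 1) d := by
  rw [List.getLast?_eq_getElem?]
  rfl

theorem foldl_prefix (xs : List String) (n : Nat) (hn : n ≤ xs.length) :
    (List.range n).foldl (fun acc i =>
      if i = 0 then acc ++ [(1 : Int)]
      else if xs.getD i "" = xs.getD (i - 1) "" then
        acc ++ [acc.getLast?.getD 0 + 1]
      else acc ++ [(1 : Int)]) [] = spec (xs.take n) := by
  induction n with
  | zero => simp [spec]
  | succ m ih =>
    have hm : m ≤ xs.length := Nat.le_of_succ_le hn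
    have hmlt : m < xs.length := hn
    rw [List.range_succ, List.foldl_append, ih hm]
    simp only [List.foldl_cons, List.foldl_nil]
    have htake : xs.take (m + 1) = xs.take m ++ [xs.getD m ""] := by
      rw [List.take_add_one]
      congr 1
      rw [List.getD_eq_getElem?_getD, List.getElem?_eq_getElem hmlt]
      rfl
    rcases Nat.eq_zero_or_pos m with hm0 | hmpos
    · subst hm0
      simp [htake, spec, specGo]
    · have hne : m ≠ 0 := Nat.pos_iff_ne_zero.mp hmpos
      have htne : xs.take m ≠ [] := by
        intro hc
        have := congrArg List.length hc
        simp [Nat.min_eq_left hm] at this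
        omega
      rw [if_neg hne, htake, spec_snoc _ _ htne]
      have hlast : (xs.take m).getLast?.getD "" = xs.getD (m - 1) "" := by
        rw [getLast?_getD_of_ne_nil]
        have hlen : (xs.take m).length = m := by simp [Nat.min_eq_left hm]
        rw [hlen]
        rw [List.getD_eq_getElem?_getD, List.getD_eq_getElem?_getD, List.getElem?_take]
        simp [Nat.sub_lt hmpos]
      rw [hlast]
      split_ifs with hc <;> rfl

theorem a_eq_spec (xs : List String) : feature_NU xs = spec xs := by
  unfold feature_NU
  rw [foldl_prefix xs xs.length le_rfl, List.take_length]

-- ===== VERDICT (by name: the statement is the Claim_ definition above) =====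
theorem feature_NU_spec : Claim_equal_feature_NU := by
  intro xs _
  unfold Spec_feature_NU
  rw [a_eq_spec, alt_eq_spec]
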